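-- pv_equiv track=rewrite | github.com/dotunpeters/coding_challenge | BeautifulBinaryString.py | beautifulBinaryString
-- ===== SOURCE A (Python) =====
-- def beautifulBinaryString(b):
--     monitor = []
--     for i in b:
--         monitor.append(i)
--
--     counter = 0
--     check = "010"
--
--     for i in range(len(b)):
--         if i > 2:
--             temp = "".join(monitor[:i])
--             if check == temp[i-3:i]:
--                 monitor[i-1] = "1"
--                 counter += 1
--
--     if "".join(monitor).endswith(check):
--         monitor[-1] = "1"
--         counter += 1
--     return counter
-- ===== SOURCE B (Python) =====
-- def beautifulBinaryString(b):
--     count = 0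
--     i = 0
--     n = len(b)
--     while i < n:
--         if b[i] == "0" and i + 2 < n and b[i + 1] == "1" and b[i + 2] == "0":
--             count += 1
--             i += 3
--         else:
--             i += 1
--     return count
-- ===== Notes on version B (the rewrite author's own statement) =====
-- stated objective: faster
-- what changed: Replaces A's quadratic per-index join/slice scan over a mutated char list with a single linear index scan that counts a '010' window and skips 3 positions on each match (no copies, no mutation).
import Mathlib
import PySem

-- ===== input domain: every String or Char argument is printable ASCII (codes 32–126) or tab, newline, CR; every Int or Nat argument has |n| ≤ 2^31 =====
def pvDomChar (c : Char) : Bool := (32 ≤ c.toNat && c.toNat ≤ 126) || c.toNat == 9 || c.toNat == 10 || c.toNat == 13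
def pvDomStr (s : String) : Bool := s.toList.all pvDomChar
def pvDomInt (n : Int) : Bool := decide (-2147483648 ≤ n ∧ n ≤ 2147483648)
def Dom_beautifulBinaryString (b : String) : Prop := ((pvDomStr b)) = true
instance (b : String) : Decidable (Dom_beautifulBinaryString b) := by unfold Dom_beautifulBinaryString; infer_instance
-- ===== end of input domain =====

-- B replaces A's quadratic join/slice-and-mutate scan by a single linear skip-3 scan (faster, asymptotic).


-- ===== PORT A =====
-- the 1-char strings of `monitor` are Chars; "".join(monitor[:i]) is the char-list slice itself
def pvAStep (st : List Char × Int) (i : Int) : List Char × Int :=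
  if i > 2 then
    let temp := PySem.List.slice st.1 none (some i)                     -- temp = "".join(monitor[:i])
    if ("010".toList = PySem.List.slice temp (some (i - 3)) (some i))   -- check == temp[i-3:i]
    then (PySem.List.pySetD st.1 (i - 1) '1', st.2 + 1)                 -- monitor[i-1] = "1"; counter += 1
    else st
  else st

def beautifulBinaryString (b : String) : Int :=
  let monitor : List Char := b.toList.foldl (fun acc c => acc ++ [c]) []   -- for i in b: monitor.append(i)
  let st := (PySem.List.pyRange 0 (PySem.Str.len b) 1).foldl pvAStep (monitor, 0)
  if PySem.Chars.endswith st.1 "010".toList then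
    let _ := PySem.List.pySetD st.1 (-1) '1'   -- monitor[-1] = "1" (dead store: monitor unused afterwards)
    st.2 + 1
  else st.2

-- ===== PORT B =====
-- Source B's while loop: on a '010' window count and advance 3, else advance 1
def pvScan : List Char → Int
  | c0 :: c1 :: c2 :: rest =>
      if c0 = '0' ∧ c1 = '1' ∧ c2 = '0' then 1 + pvScan rest
      else pvScan (c1 :: c2 :: rest)
  | _ :: rest => pvScan rest
  | [] => 0
termination_by l => l.length

def beautifulBinaryString_alt (b : String) : Int := pvScan b.toList

-- ===== PRECONDITION & SPEC =====
def Spec_beautifulBinaryString (b : String) (out : Int) : Prop := out = beautifulBinaryString_alt b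
instance (b : String) (out : Int) : Decidable (Spec_beautifulBinaryString b out) := by unfold Spec_beautifulBinaryString; infer_instance

-- ===== CLAIM (what is proved, stated in full; the proofs are below) =====
def Claim_equal_beautifulBinaryString : Prop := ∀ (b : String), Dom_beautifulBinaryString b → Spec_beautifulBinaryString b (beautifulBinaryString b)

-- ===== LEMMAS AND PROOFS =====

-- proof-side model of A's mutating scan: state (p2, p1) = last two (possibly mutated) chars before
-- the cursor; returns (mutated remainder, final state, count)
def pvRun (p2 p1 : Char) : List Char → List Char × (Char × Char) × Int
  | [] => ([], (p2, p1), 0)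
  | c :: r =>
    if p2 = '0' ∧ p1 = '1' ∧ c = '0' then
      let g := pvRun p1 '1' r
      ('1' :: g.1, g.2.1, g.2.2 + 1)
    else
      let g := pvRun p1 c r
      (c :: g.1, g.2.1, g.2.2)

theorem pvRun_length (p2 p1 : Char) (l : List Char) : (pvRun p2 p1 l).1.length = l.length := by
  induction l generalizing p2 p1 with
  | nil => simp [pvRun]
  | cons c r ih => simp only [pvRun]; split <;> simp [ih]

theorem pvRun_drop (p2 p1 : Char) (l : List Char) :
    (p2 :: p1 :: (pvRun p2 p1 l).1).drop l.length
      = [(pvRun p2 p1 l).2.1.1, (pvRun p2 p1 l).2.1.2] := by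
  induction l generalizing p2 p1 with
  | nil => simp [pvRun]
  | cons c r ih => simp only [pvRun]; split <;> simp [ih]

theorem pvRun_snoc (p2 p1 : Char) (l : List Char) (c : Char) :
    pvRun p2 p1 (l ++ [c]) =
      (let g := pvRun p2 p1 l
       if g.2.1.1 = '0' ∧ g.2.1.2 = '1' ∧ c = '0' then (g.1 ++ ['1'], (g.2.1.2, '1'), g.2.2 + 1)
       else (g.1 ++ [c], (g.2.1.2, c), g.2.2)) := by
  induction l generalizing p2 p1 with
  | nil => simp [pvRun]
  | cons d r ih =>
      simp only [List.cons_append, pvRun]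
      split <;> simp [ih] <;> split <;> simp

theorem pvScan_one_cons (r : List Char) : pvScan ('1' :: r) = pvScan r := by
  match r with
  | [] => simp [pvScan]
  | [c] => simp [pvScan]
  | c :: d :: r' => rw [pvScan]; simp

theorem pvRun_count (p2 p1 : Char) (l : List Char) :
    (pvRun p2 p1 l).2.2 = pvScan (p2 :: p1 :: l) := by
  induction l generalizing p2 p1 with
  | nil => simp [pvRun, pvScan]
  | cons c r ih =>
      simp only [pvRun]
      by_cases h : p2 = '0' ∧ p1 = '1' ∧ c = '0'
      · obtain ⟨h2, h1, hc⟩ := h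
        subst h2; subst h1; subst hc
        rw [if_pos ⟨rfl, rfl, rfl⟩]
        rw [show pvScan ('0' :: '1' :: '0' :: r) = 1 + pvScan r from by rw [pvScan]; simp]
        simp only [ih, pvScan_one_cons]
        omega
      · rw [if_neg h]
        simp only [ih]
        conv_rhs => rw [pvScan]
        rw [if_neg h]

theorem pv_set_append {α : Type} (u : List α) (v c : α) (r : List α) :
    (u ++ c :: r).set u.length v = u ++ v :: r := by
  induction u with
  | nil => simp
  | cons a u ih => simp [ih]

theorem pv_suffix_iff (p M : List α) : p <:+ M ↔ M.drop (M.length - p.length) = p := by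
  constructor
  · rintro ⟨u, rfl⟩
    simp
  · intro h
    have h2 := List.take_append_drop (M.length - p.length) M
    rw [h] at h2
    exact ⟨M.take (M.length - p.length), h2⟩

-- one loop iteration i = k+3, evaluated on a state of the invariant's shape
theorem pvAStep_eval (x0 x1 a bc tk : Char) (m suf : List Char) (cnt : Int) (k : Nat)
    (hm : m.length = k) (hdrop : (x0 :: x1 :: m).drop k = [a, bc]) :
    pvAStep (x0 :: x1 :: (m ++ tk :: suf), cnt) ((k : Int) + 3) =
      if a = '0' ∧ bc = '1' ∧ tk = '0' then (x0 :: x1 :: (m ++ '1' :: suf), cnt + 1)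
      else (x0 :: x1 :: (m ++ tk :: suf), cnt) := by
  have hi : ((k : Int) + 3) = ((k + 3 : Nat) : Int) := by push_cast; ring
  have ha : ((k + 3 : Nat) : Int) - 3 = ((k : Nat) : Int) := by push_cast; ring
  have hm1 : ((k + 3 : Nat) : Int) - 1 = ((k + 2 : Nat) : Int) := by push_cast; ring
  simp only [pvAStep, hi, ha, hm1]
  rw [if_pos (by omega : ((k + 3 : Nat) : Int) > 2)]
  rw [PySem.List.slice_to_natCast, PySem.List.slice_natCast, PySem.List.pySetD_natCast]
  have htake : (x0 :: x1 :: (m ++ tk :: suf)).take (k + 3) = (x0 :: x1 :: m) ++ [tk] := by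
    simp only [List.take_succ_cons, List.take_append]
    rw [List.take_of_length_le (by omega), hm, show k + 1 - k = 1 by omega]
    simp
  rw [htake]
  have hwin : (((x0 :: x1 :: m) ++ [tk]).drop k).take (k + 3 - k) = [a, bc, tk] := by
    rw [List.drop_append]
    have : k - (x0 :: x1 :: m).length = 0 := by simp only [List.length_cons, hm]; omega
    rw [this, hdrop]
    simp [show k + 3 - k = 3 by omega]
  rw [hwin]
  have hset : (x0 :: x1 :: (m ++ tk :: suf)).set (k + 2) '1'
      = x0 :: x1 :: (m ++ '1' :: suf) := by
    rw [show k + 2 = (k + 1) + 1 from rfl, List.set_cons_succ, List.set_cons_succ]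
    rw [← hm, pv_set_append]
  rw [hset]
  have hcheck : "010".toList = ['0', '1', '0'] := rfl
  rw [hcheck]
  by_cases hcond : a = '0' ∧ bc = '1' ∧ tk = '0'
  · obtain ⟨h1, h2, h3⟩ := hcond
    subst h1; subst h2; subst h3
    rw [if_pos rfl, if_pos ⟨rfl, rfl, rfl⟩]
  · rw [if_neg (fun h => hcond (by
        injection h with e1 h'; injection h' with e2 h''; injection h'' with e3
        exact ⟨e1.symm, e2.symm, e3.symm⟩)), if_neg hcond]

-- loop invariant: after iterations 0 .. k+2 (k consumed windows), the fold's state is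
-- the mutated prefix produced by pvRun plus the untouched suffix, with pvRun's count
theorem pvA_inv (x0 x1 : Char) (t : List Char) (k : Nat) (hk : k + 1 ≤ t.length) :
    (PySem.List.pyRange 0 ((k : Int) + 3) 1).foldl pvAStep (x0 :: x1 :: t, 0)
      = (x0 :: x1 :: ((pvRun x0 x1 (t.take k)).1 ++ t.drop k), (pvRun x0 x1 (t.take k)).2.2) := by
  induction k with
  | zero =>
      rw [show ((0 : Nat) : Int) + 3 = 3 by norm_num,
          show PySem.List.pyRange 0 3 1 = [0, 1, 2] from by decide]
      simp [pvAStep, pvRun]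
  | succ k ih =>
      have hk' : k + 1 ≤ t.length := by omega
      have hklt : k < t.length := by omega
      rw [show ((k + 1 : Nat) : Int) + 3 = ((k : Int) + 3) + 1 by push_cast; ring,
          PySem.List.pyRange_one_succ_right (by omega : (0 : Int) ≤ (k : Int) + 3),
          List.foldl_append, ih hk']
      have hmlen : (pvRun x0 x1 (t.take k)).1.length = k := by
        rw [pvRun_length]; simp [List.length_take]; omega
      have hdrop2 : (x0 :: x1 :: (pvRun x0 x1 (t.take k)).1).drop k
          = [(pvRun x0 x1 (t.take k)).2.1.1, (pvRun x0 x1 (t.take k)).2.1.2] := by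
        have := pvRun_drop x0 x1 (t.take k)
        rwa [show (t.take k).length = k by simp [List.length_take]; omega] at this
      rw [show t.drop k = t[k] :: t.drop (k + 1) from List.drop_eq_getElem_cons hklt]
      simp only [List.foldl_cons, List.foldl_nil]
      rw [pvAStep_eval x0 x1 _ _ _ _ _ _ k hmlen hdrop2]
      rw [show t.take (k + 1) = t.take k ++ [t[k]] from (List.take_append_getElem hklt).symm,
          pvRun_snoc]
      by_cases hc : (pvRun x0 x1 (t.take k)).2.1.1 = '0' ∧ (pvRun x0 x1 (t.take k)).2.1.2 = '1' ∧ t[k] = '0'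
      · rw [if_pos hc]; simp only [if_pos hc]; simp
      · rw [if_neg hc]; simp only [if_neg hc]; simp

theorem pv_endswith_short (M : List Char) (h : M.length < 3) :
    PySem.Chars.endswith M "010".toList = false := by
  rw [Bool.eq_false_iff]
  intro hs
  rw [PySem.Chars.endswith_iff] at hs
  have := hs.length_le
  simp only [show ("010".toList).length = 3 from rfl] at this
  omega

-- ===== VERDICT (by name: the statement is the Claim_ definition above) =====
theorem beautifulBinaryString_spec : Claim_equal_beautifulBinaryString := by
  intro b _
  show beautifulBinaryString b = beautifulBinaryString_alt b
  unfold beautifulBinaryString beautifulBinaryString_alt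
  simp only [PySem.List.foldl_append_singleton, List.nil_append, PySem.Str.len_eq]
  generalize b.toList = xs
  rcases xs with _ | ⟨x0, _ | ⟨x1, _ | ⟨c, t'⟩⟩⟩
  · rw [show ((([] : List Char).length) : Nat) = 0 from rfl,
        show PySem.List.pyRange 0 ((0 : Nat) : Int) 1 = [] from by decide]
    simp only [List.foldl_nil]
    rw [show PySem.Chars.endswith [] "010".toList = false from rfl]
    simp [pvScan]
  · rw [show (([x0] : List Char).length) = 1 from rfl,
        show PySem.List.pyRange 0 ((1 : Nat) : Int) 1 = [0] from by decide]
    simp only [List.foldl_cons, List.foldl_nil]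
    rw [show pvAStep ([x0], 0) 0 = ([x0], 0) from by simp [pvAStep]]
    rw [pv_endswith_short [x0] (by simp)]
    simp [pvScan]
  · rw [show (([x0, x1] : List Char).length) = 2 from rfl,
        show PySem.List.pyRange 0 ((2 : Nat) : Int) 1 = [0, 1] from by decide]
    simp only [List.foldl_cons, List.foldl_nil]
    rw [show pvAStep ([x0, x1], 0) 0 = ([x0, x1], 0) from by simp [pvAStep],
        show pvAStep ([x0, x1], 0) 1 = ([x0, x1], 0) from by simp [pvAStep]]
    rw [pv_endswith_short [x0, x1] (by simp)]
    simp [pvScan]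
  · -- xs = x0 :: x1 :: c :: t' ; run the invariant to the end of the loop
    set k := t'.length with hkdef
    have hklt : k < (c :: t').length := by simp [hkdef]
    rw [show (((x0 :: x1 :: c :: t').length : Nat) : Int) = (k : Int) + 3 by
          simp only [List.length_cons, hkdef]; push_cast; ring]
    rw [pvA_inv x0 x1 (c :: t') k (by simp [hkdef])]
    set g := pvRun x0 x1 ((c :: t').take k) with hg
    have hmlen : g.1.length = k := by
      rw [hg, pvRun_length]; simp [List.length_take, hkdef]
    have hdropk : (c :: t').drop k = [(c :: t')[k]] := by
      rw [List.drop_eq_getElem_cons hklt, show k + 1 = (c :: t').length from by simp [hkdef],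
          List.drop_length]
    have hdrop2 : (x0 :: x1 :: g.1).drop k = [g.2.1.1, g.2.1.2] := by
      have h := pvRun_drop x0 x1 ((c :: t').take k)
      rwa [show ((c :: t').take k).length = k by simp [List.length_take, hkdef], ← hg] at h
    have hM : x0 :: x1 :: (g.1 ++ (c :: t').drop k)
        = (x0 :: x1 :: g.1) ++ [(c :: t')[k]] := by rw [hdropk]; simp
    have hdrop3 : ((x0 :: x1 :: g.1) ++ [(c :: t')[k]]).drop k
        = [g.2.1.1, g.2.1.2, (c :: t')[k]] := by
      rw [List.drop_append, hdrop2,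
          show k - (x0 :: x1 :: g.1).length = 0 from by simp only [List.length_cons, hmlen]; omega]
      simp
    have hMlen : ((x0 :: x1 :: g.1) ++ [(c :: t')[k]]).length - ("010".toList).length = k := by
      simp only [List.length_append, List.length_cons, List.length_nil, hmlen,
        show ("010".toList).length = 3 from rfl]
      omega
    -- pvRun on all of c :: t', via one final snoc step
    have hfull : (c :: t').take k ++ [(c :: t')[k]] = c :: t' := by
      rw [List.take_append_getElem hklt, show k + 1 = (c :: t').length from by simp [hkdef],
          List.take_length]
    have hsnoc := pvRun_snoc x0 x1 ((c :: t').take k) ((c :: t')[k])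
    rw [hfull, ← hg] at hsnoc
    rw [hM]
    by_cases hc : g.2.1.1 = '0' ∧ g.2.1.2 = '1' ∧ (c :: t')[k] = '0'
    · have hend : PySem.Chars.endswith ((x0 :: x1 :: g.1) ++ [(c :: t')[k]]) "010".toList = true := by
        rw [PySem.Chars.endswith_iff, pv_suffix_iff, hMlen, hdrop3, hc.1, hc.2.1, hc.2.2]
        rfl
      rw [hend, if_pos rfl]
      rw [← pvRun_count x0 x1 (c :: t'), hsnoc, if_pos hc]
    · have hend : PySem.Chars.endswith ((x0 :: x1 :: g.1) ++ [(c :: t')[k]]) "010".toList = false := by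
        rw [Bool.eq_false_iff]
        intro hs
        rw [PySem.Chars.endswith_iff, pv_suffix_iff, hMlen, hdrop3] at hs
        exact hc (by
          injection hs with e1 h'; injection h' with e2 h''; injection h'' with e3
          exact ⟨e1, e2, e3⟩)
      rw [hend, if_neg (by simp)]
      rw [← pvRun_count x0 x1 (c :: t'), hsnoc, if_neg hc]
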